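-- pv_equiv track=rewrite | github.com/daniel-reich/ubiquitous-fiesta | 5D3iXJSkSreRzNS8W_8.py | news_at_ten
-- ===== SOURCE A (Python) =====
-- def news_at_ten(txt, n):
--   arr = []
--   for inst in range(len(txt) + n):
--     new_str = ""
--     if inst < n:
--       for t in range(n-inst):
--         new_str += " "
--       new_str += txt[0:inst]
--     else:
--       new_str += txt[inst-n:inst]
--     for t in range(n-len(new_str)):
--         new_str += " "
--     arr.append(new_str)
--   new_str = ""
--   for t in range(n):
--     new_str += " "
--   arr.append(new_str)
--   return(arr)
-- ===== SOURCE B (Python) =====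
-- def news_at_ten(txt, n):
--     w = max(n, 0)
--     padded = " " * w + txt
--     return [padded[i:i+w].ljust(w) for i in range(max(len(txt) + n, 0) + 1)]
-- ===== Notes on version B (the rewrite author's own statement) =====
-- stated objective: idiomatic
-- what changed: B precomputes one space-padded string and emits every frame as a uniform fixed-width sliding window padded[i:i+w].ljust(w), replacing A's per-frame if/else case analysis, char-by-char space-accumulation loops and the separately built final blank row.
import Mathlib
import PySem

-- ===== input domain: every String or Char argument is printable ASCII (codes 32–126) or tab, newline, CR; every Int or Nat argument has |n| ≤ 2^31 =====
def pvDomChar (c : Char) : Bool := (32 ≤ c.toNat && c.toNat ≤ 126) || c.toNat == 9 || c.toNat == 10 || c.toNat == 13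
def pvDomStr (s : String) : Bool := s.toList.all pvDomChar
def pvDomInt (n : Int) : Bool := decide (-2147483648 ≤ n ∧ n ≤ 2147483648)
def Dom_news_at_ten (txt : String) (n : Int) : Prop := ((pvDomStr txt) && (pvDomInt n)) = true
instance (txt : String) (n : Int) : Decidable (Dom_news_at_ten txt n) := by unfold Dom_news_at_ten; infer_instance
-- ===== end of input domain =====

-- B replaces A's per-frame if/else case analysis and char-by-char space loops with one
-- precomputed padded string and a uniform fixed-width sliding window (more idiomatic, same cost).

-- ===== PORT A =====
def news_at_ten (txt : String) (n : Int) : List String :=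
  let t := txt.toList
  let arr : List String :=
    (PySem.List.pyRange 0 ((t.length : Int) + n) 1).foldl (fun arr inst =>
      let new_str : List Char := []
      let new_str :=
        if inst < n then
          ((PySem.List.pyRange 0 (n - inst) 1).foldl (fun s _ => s ++ [' ']) new_str)
            ++ PySem.List.slice t (some 0) (some inst)
        else
          new_str ++ PySem.List.slice t (some (inst - n)) (some inst)
      let new_str :=
        (PySem.List.pyRange 0 (n - (new_str.length : Int)) 1).foldl (fun s _ => s ++ [' ']) new_str
      arr ++ [String.ofList new_str]) []
  arr ++ [String.ofList ((PySem.List.pyRange 0 n 1).foldl (fun s _ => s ++ [' ']) [])]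

-- ===== PORT B =====
-- cs.ljust(w): pad on the right with spaces to width w
def pvLjust (cs : List Char) (w : Int) : List Char :=
  cs ++ List.replicate (w.toNat - cs.length) ' '

def news_at_ten_alt (txt : String) (n : Int) : List String :=
  let w := max n 0
  let padded := PySem.List.pyRepeat [' '] w ++ txt.toList
  (PySem.List.pyRange 0 (max ((txt.toList.length : Int) + n) 0 + 1) 1).map (fun i =>
    String.ofList (pvLjust (PySem.List.slice padded (some i) (some (i + w))) w))

-- ===== PRECONDITION & SPEC =====
def Spec_news_at_ten (txt : String) (n : Int) (out : List String) : Prop := out = news_at_ten_alt txt n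
instance (txt : String) (n : Int) (out : List String) : Decidable (Spec_news_at_ten txt n out) := by unfold Spec_news_at_ten; infer_instance

-- ===== CLAIM (what is proved, stated in full; the proofs are below) =====
def Claim_equal_news_at_ten : Prop := ∀ (txt : String) (n : Int), Dom_news_at_ten txt n → Spec_news_at_ten txt n (news_at_ten txt n)

-- ===== LEMMAS AND PROOFS =====

-- A's per-frame value, in closed form
def pvFrameA (t : List Char) (n inst : Int) : List Char :=
  let s1 := if inst < n then
      List.replicate (n - inst).toNat ' ' ++ PySem.List.slice t (some 0) (some inst)
    else PySem.List.slice t (some (inst - n)) (some inst)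
  s1 ++ List.replicate (n - (s1.length : Int)).toNat ' '

lemma pvA_eq (txt : String) (n : Int) :
    news_at_ten txt n =
      ((PySem.List.pyRange 0 ((txt.toList.length : Int) + n) 1).map
        (fun inst => String.ofList (pvFrameA txt.toList n inst)))
        ++ [String.ofList (List.replicate n.toNat ' ')] := by
  simp only [news_at_ten, PySem.List.foldl_append_singleton_eq_map, List.map_const',
    PySem.List.length_pyRange_one, Int.sub_zero, List.nil_append, pvFrameA]

-- B's per-frame value
def pvFrameB (t : List Char) (n i : Int) : List Char :=
  pvLjust (PySem.List.slice (List.replicate (max n 0).toNat ' ' ++ t) (some i) (some (i + max n 0))) (max n 0)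

lemma pvB_eq (txt : String) (n : Int) :
    news_at_ten_alt txt n =
      (PySem.List.pyRange 0 (max ((txt.toList.length : Int) + n) 0 + 1) 1).map
        (fun i => String.ofList (pvFrameB txt.toList n i)) := by
  simp only [news_at_ten_alt, pvFrameB, PySem.List.pyRepeat_singleton]

lemma pv_frame_eq (t : List Char) (n i : Int) (h0 : 0 ≤ i) (h1 : i < (t.length : Int) + n) :
    pvFrameA t n i = pvFrameB t n i := by
  unfold pvFrameA pvFrameB pvLjust
  by_cases hi : i < n
  · have hn : 0 < n := lt_of_le_of_lt h0 hi
    have e1 : PySem.List.slice t (some 0) (some i) = t.take i.toNat := by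
      rw [PySem.List.slice_zero_start, PySem.List.slice_to t h0]
    have e2 : PySem.List.slice (List.replicate n.toNat ' ' ++ t) (some i) (some (i + n)) =
        List.replicate (n.toNat - i.toNat) ' ' ++ t.take i.toNat := by
      rw [PySem.List.slice_toNat _ h0 (by omega : (0:Int) ≤ i + n)]
      rw [List.drop_append, List.take_append]
      simp only [List.drop_replicate, List.take_replicate, List.length_replicate]
      rw [show i.toNat - n.toNat = 0 from by omega, List.drop_zero,
          show (i + n).toNat - i.toNat = n.toNat from by omega,
          show min n.toNat (n.toNat - i.toNat) = n.toNat - i.toNat from by omega,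
          show n.toNat - (n.toNat - i.toNat) = i.toNat from by omega]
    rw [if_pos hi, e1, max_eq_left hn.le, e2]
    simp only [List.length_append, List.length_replicate, List.length_take, List.append_assoc]
    congr 1
    · congr 1; omega
    · congr 2; omega
  · have hni : n ≤ i := le_of_not_gt hi
    rw [if_neg hi]
    by_cases hn : 0 ≤ n
    · have e1 : PySem.List.slice t (some (i - n)) (some i) =
          (t.drop (i.toNat - n.toNat)).take n.toNat := by
        rw [PySem.List.slice_toNat t (by omega : (0:Int) ≤ i - n) h0,
            show (i - n).toNat = i.toNat - n.toNat from by omega,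
            show i.toNat - (i.toNat - n.toNat) = n.toNat from by omega]
      have e2 : PySem.List.slice (List.replicate n.toNat ' ' ++ t) (some i) (some (i + n)) =
          (t.drop (i.toNat - n.toNat)).take n.toNat := by
        rw [PySem.List.slice_toNat _ h0 (by omega : (0:Int) ≤ i + n)]
        rw [List.drop_append]
        simp only [List.drop_replicate, List.length_replicate]
        rw [show n.toNat - i.toNat = 0 from by omega, List.replicate_zero, List.nil_append,
            show (i + n).toNat - i.toNat = n.toNat from by omega]
      rw [e1, max_eq_left hn, e2]
      simp only [List.length_take, List.length_drop]
      congr 2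
      omega
    · have hn' : n < 0 := lt_of_not_ge hn
      have e1 : PySem.List.slice t (some (i - n)) (some i) = [] := by
        rw [PySem.List.slice_toNat t (by omega : (0:Int) ≤ i - n) h0,
            show i.toNat - (i - n).toNat = 0 from by omega, List.take_zero]
      rw [e1, max_eq_right hn'.le]
      simp [PySem.List.slice_toNat t h0 h0, Int.toNat_of_nonpos hn'.le]

lemma pv_last_frame (t : List Char) (n : Int) (h : 0 ≤ (t.length : Int) + n) :
    pvFrameB t n ((t.length : Int) + n) = List.replicate n.toNat ' ' := by
  unfold pvFrameB pvLjust
  by_cases hn : 0 ≤ n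
  · rw [max_eq_left hn, PySem.List.slice_toNat _ h (by omega),
        List.drop_eq_nil_of_le
          (by simp only [List.length_append, List.length_replicate]; omega),
        List.take_nil]
    simp
  · have hn' : n < 0 := lt_of_not_ge hn
    rw [max_eq_right hn'.le, PySem.List.slice_toNat _ h (by omega)]
    simp [Int.toNat_of_nonpos hn'.le]

-- ===== VERDICT (by name: the statement is the Claim_ definition above) =====
theorem news_at_ten_spec : Claim_equal_news_at_ten := by
  intro txt n _
  unfold Spec_news_at_ten
  rw [pvA_eq, pvB_eq]
  by_cases h : 0 ≤ (txt.toList.length : Int) + n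
  · rw [max_eq_left h, PySem.List.pyRange_one_succ_right h, List.map_append]
    congr 1
    · exact List.map_congr_left (fun i hi => by
        rw [PySem.List.mem_pyRange_one] at hi
        exact congrArg String.ofList (pv_frame_eq txt.toList n i hi.1 hi.2))
    · rw [List.map_singleton, pv_last_frame txt.toList n h]
  · have h' : (txt.toList.length : Int) + n ≤ 0 := le_of_not_ge h
    rw [PySem.List.pyRange_one_eq_nil h', max_eq_right h']
    have hn : n < 0 := by
      have := Int.natCast_nonneg txt.toList.length
      omega
    rw [show ((0:Int) + 1) = 0 + 1 by ring, PySem.List.pyRange_one_singleton]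
    simp [pvFrameB, pvLjust, max_eq_right (le_of_lt hn), PySem.List.slice,
      Int.toNat_of_nonpos (le_of_lt hn)]
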